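-- pv_equiv track=rewrite | github.com/Jia-520-only/NagaAgent-Custom-Modded-Version | NagaAgent_v5.0.0_20260222_223727/NagaAgent_v5.0.0_20260222_223727/Undefined/src/Undefined/webui/utils.py | _normalize_comment_buffer
-- ===== SOURCE A (Python) =====
-- def _normalize_comment_buffer(buffer: list[str]) -> dict[str, str]:
--     if not buffer:
--         return {}
--     parts: dict[str, list[str]] = {}
--     for item in buffer:
--         lower = item.lower()
--         if lower.startswith("zh:"):
--             parts.setdefault("zh", []).append(item[3:].strip())
--         elif lower.startswith("en:"):
--             parts.setdefault("en", []).append(item[3:].strip())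
--         else:
--             parts.setdefault("default", []).append(item)
--
--     default = " ".join(parts.get("default", [])).strip()
--     zh_value = " ".join(parts.get("zh", [])).strip()
--     en_value = " ".join(parts.get("en", [])).strip()
--
--     result: dict[str, str] = {}
--     if zh_value:
--         result["zh"] = zh_value
--     if en_value:
--         result["en"] = en_value
--     if default:
--         if "zh" not in result:
--             result["zh"] = default
--         if "en" not in result:
--             result["en"] = default
--     return result
-- ===== SOURCE B (Python) =====
-- def _normalize_comment_buffer(buffer: list[str]) -> dict[str, str]:
--     zh_value = " ".join(item[3:].strip() for item in buffer
--                         if item.lower().startswith("zh:")).strip()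
--     en_value = " ".join(item[3:].strip() for item in buffer
--                         if item.lower().startswith("en:")).strip()
--     default = " ".join(item for item in buffer
--                        if not item.lower().startswith(("zh:", "en:"))).strip()
--     result: dict[str, str] = {}
--     if zh_value:
--         result["zh"] = zh_value
--     if en_value:
--         result["en"] = en_value
--     if default:
--         result.setdefault("zh", default)
--         result.setdefault("en", default)
--     return result
-- ===== Notes on version B (the rewrite author's own statement) =====
-- stated objective: simpler
-- what changed: Replaces the dict-of-lists bucketing loop (setdefault/append into 'zh'/'en'/'default' buckets) by three independent filtered comprehensions over the buffer, one per category, then the final assembly uses setdefault instead of membership-test-plus-insert.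
import Mathlib
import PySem

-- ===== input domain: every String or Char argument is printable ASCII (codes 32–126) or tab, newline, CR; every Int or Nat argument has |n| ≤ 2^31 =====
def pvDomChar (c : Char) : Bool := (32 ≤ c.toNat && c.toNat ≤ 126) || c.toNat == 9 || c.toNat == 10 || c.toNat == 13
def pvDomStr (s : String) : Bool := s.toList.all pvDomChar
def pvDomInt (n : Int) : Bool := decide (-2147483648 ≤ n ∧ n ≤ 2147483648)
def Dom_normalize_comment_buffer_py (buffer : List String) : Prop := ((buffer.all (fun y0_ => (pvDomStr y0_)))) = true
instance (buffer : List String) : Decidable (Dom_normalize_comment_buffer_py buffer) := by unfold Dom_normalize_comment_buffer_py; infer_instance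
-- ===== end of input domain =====

-- B groups the buffer by three independent filtered passes instead of A's single
-- bucketing loop into a dict of lists; objective: simpler.

-- ===== PORT A =====
-- one loop step of A's 'for item in buffer' (setdefault(k, []).append(v) is d[k] = d.get(k, []) + [v], i.e. Dict.modify)
def pvStepA (parts : PySem.Dict String (List String)) (item : String) : PySem.Dict String (List String) :=
  let lower := PySem.Str.lower item
  if PySem.Str.startswith lower "zh:" then
    parts.modify "zh" [] (· ++ [PySem.Str.strip (PySem.Str.slice item (some 3) none)])
  else if PySem.Str.startswith lower "en:" then
    parts.modify "en" [] (· ++ [PySem.Str.strip (PySem.Str.slice item (some 3) none)])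
  else
    parts.modify "default" [] (· ++ [item])

def normalize_comment_buffer_py (buffer : List String) : List (String × String) :=
  if buffer = [] then []
  else
    let parts := buffer.foldl pvStepA PySem.Dict.empty
    let dflt := PySem.Str.strip (PySem.Str.join " " (parts.getD "default" []))
    let zh_value := PySem.Str.strip (PySem.Str.join " " (parts.getD "zh" []))
    let en_value := PySem.Str.strip (PySem.Str.join " " (parts.getD "en" []))
    let result : PySem.Dict String String := PySem.Dict.empty
    let result := if zh_value ≠ "" then result.insert "zh" zh_value else result
    let result := if en_value ≠ "" then result.insert "en" en_value else result
    let result := if dflt ≠ "" then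
        let result := if ¬ result.contains "zh" then result.insert "zh" dflt else result
        if ¬ result.contains "en" then result.insert "en" dflt else result
      else result
    result.items

-- ===== PORT B =====
def normalize_comment_buffer_py_alt (buffer : List String) : List (String × String) :=
  let zh_value := PySem.Str.strip (PySem.Str.join " "
    ((buffer.filter (fun item => PySem.Str.startswith (PySem.Str.lower item) "zh:")).map
      (fun item => PySem.Str.strip (PySem.Str.slice item (some 3) none))))
  let en_value := PySem.Str.strip (PySem.Str.join " "
    ((buffer.filter (fun item => PySem.Str.startswith (PySem.Str.lower item) "en:")).map
      (fun item => PySem.Str.strip (PySem.Str.slice item (some 3) none))))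
  let dflt := PySem.Str.strip (PySem.Str.join " "
    (buffer.filter (fun item =>
      !(PySem.Str.startswith (PySem.Str.lower item) "zh:" ||
        PySem.Str.startswith (PySem.Str.lower item) "en:"))))
  let result : PySem.Dict String String := PySem.Dict.empty
  let result := if zh_value ≠ "" then result.insert "zh" zh_value else result
  let result := if en_value ≠ "" then result.insert "en" en_value else result
  let result := if dflt ≠ "" then (result.setdefault "zh" dflt).setdefault "en" dflt else result
  result.items

-- ===== PRECONDITION & SPEC =====
def Spec_normalize_comment_buffer_py (buffer : List String) (out : List (String × String)) : Prop := out = normalize_comment_buffer_py_alt buffer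
instance (buffer : List String) (out : List (String × String)) : Decidable (Spec_normalize_comment_buffer_py buffer out) := by unfold Spec_normalize_comment_buffer_py; infer_instance

-- ===== CLAIM (what is proved, stated in full; the proofs are below) =====
def Claim_equal_normalize_comment_buffer_py : Prop := ∀ (buffer : List String), Dom_normalize_comment_buffer_py buffer → Spec_normalize_comment_buffer_py buffer (normalize_comment_buffer_py buffer)

-- ===== LEMMAS AND PROOFS =====

-- the three buckets of A's loop are exactly B's three filtered scans
theorem pvFold_inv (buffer : List String) (d : PySem.Dict String (List String)) :
    (buffer.foldl pvStepA d).getD "zh" [] =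
      d.getD "zh" [] ++ ((buffer.filter (fun item => PySem.Str.startswith (PySem.Str.lower item) "zh:")).map
        (fun item => PySem.Str.strip (PySem.Str.slice item (some 3) none)))
    ∧ (buffer.foldl pvStepA d).getD "en" [] =
      d.getD "en" [] ++ ((buffer.filter (fun item => PySem.Str.startswith (PySem.Str.lower item) "en:")).map
        (fun item => PySem.Str.strip (PySem.Str.slice item (some 3) none)))
    ∧ (buffer.foldl pvStepA d).getD "default" [] =
      d.getD "default" [] ++ (buffer.filter (fun item =>
        !(PySem.Str.startswith (PySem.Str.lower item) "zh:" ||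
          PySem.Str.startswith (PySem.Str.lower item) "en:"))) := by
  induction buffer generalizing d with
  | nil => simp
  | cons a l ih =>
    obtain ⟨ih1, ih2, ih3⟩ := ih (pvStepA d a)
    refine ⟨?_, ?_, ?_⟩ <;>
      simp only [List.foldl_cons, List.filter_cons, ih1, ih2, ih3] <;>
      by_cases h1 : PySem.Chars.startswith (PySem.Chars.lower a.toList) ['z','h',':'] = true <;>
      by_cases h2 : PySem.Chars.startswith (PySem.Chars.lower a.toList) ['e','n',':'] = true <;>
      simp [pvStepA, h1, h2, PySem.Dict.getD_modify] <;>
      · -- a string cannot start with both "zh:" and "en:"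
        obtain ⟨t1, e1⟩ := (PySem.Chars.startswith_iff _ _).mp h1
        obtain ⟨t2, e2⟩ := (PySem.Chars.startswith_iff _ _).mp h2
        rw [← e1] at e2
        simp at e2

-- A's membership-test-plus-insert is exactly setdefault
theorem pvSetdefault_eq (d : PySem.Dict String String) (k v : String) :
    (if ¬ d.contains k then d.insert k v else d) = d.setdefault k v := by
  by_cases h : d.contains k = true
  · simp [h, PySem.Dict.setdefault_of_contains _ _ h]
  · simp [h]
    exact (PySem.Dict.setdefault_of_not_contains _ _ (by simpa using h)).symm

-- ===== VERDICT (by name: the statement is the Claim_ definition above) =====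
theorem normalize_comment_buffer_py_spec : Claim_equal_normalize_comment_buffer_py := by
  intro buffer _
  unfold Spec_normalize_comment_buffer_py normalize_comment_buffer_py normalize_comment_buffer_py_alt
  by_cases hb : buffer = []
  · subst hb; decide
  · obtain ⟨h1, h2, h3⟩ := pvFold_inv buffer PySem.Dict.empty
    simp only [hb, if_false, h1, h2, h3, PySem.Dict.getD_empty, List.nil_append,
      pvSetdefault_eq]
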